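-- pv_equiv track=rewrite | github.com/Vdamarla7/badminton | badminton/analysis/shot_descriptor.py | _identify_shot_phases
-- ===== SOURCE A (Python) =====
-- from typing import List, Dict, Optional
--
-- def _identify_shot_phases(player_data: List[Dict[str, str]]) -> List[str]:
--     """
--     Identify different phases of the shot based on poselet changes.
--
--     Args:
--         player_data: List of poselet dictionaries for each frame
--
--     Returns:
--         List of identified shot phases
--     """
--     if len(player_data) < 3:
--         return ["incomplete_shot"]
--
--     phases = []
--
--     # Simple heuristic: look for changes in arm positions
--     prev_arm_state = None
--     for frame_data in player_data:
--         current_arm_state = (frame_data.get('left_arm', ''), frame_data.get('right_arm', ''))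
--
--         if prev_arm_state is None:
--             phases.append("preparation")
--         elif current_arm_state != prev_arm_state:
--             phases.append("transition")
--         else:
--             phases.append("hold")
--
--         prev_arm_state = current_arm_state
--
--     return phases
-- ===== SOURCE B (Python) =====
-- def _identify_shot_phases(player_data):
--     if len(player_data) < 3:
--         return ["incomplete_shot"]
--     states = [(f.get('left_arm', ''), f.get('right_arm', '')) for f in player_data]
--
--     def take_run(s, rest):
--         # length of the maximal prefix of `rest` equal to s, and what follows it
--         n = 0
--         while rest and rest[0] == s:
--             n += 1
--             rest = rest[1:]
--         return n, rest
--
--     # run-length decomposition: each run's head is "preparation" (first run) or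
--     # "transition"; the remaining frames of a run are "hold"
--     phases = []
--     first = True
--     rest = states
--     while rest:
--         s, rest = rest[0], rest[1:]
--         n, rest = take_run(s, rest)
--         phases.append("preparation" if first else "transition")
--         phases.extend(["hold"] * n)
--         first = False
--     return phases
-- ===== Notes on version B (the rewrite author's own statement) =====
-- stated objective: alternative
-- what changed: Replaces A's per-frame prev-pointer loop with a run-length decomposition: consecutive equal arm-states are grouped into maximal runs, and each run is expanded to a head label (preparation/transition) followed by holds.
import Mathlib
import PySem

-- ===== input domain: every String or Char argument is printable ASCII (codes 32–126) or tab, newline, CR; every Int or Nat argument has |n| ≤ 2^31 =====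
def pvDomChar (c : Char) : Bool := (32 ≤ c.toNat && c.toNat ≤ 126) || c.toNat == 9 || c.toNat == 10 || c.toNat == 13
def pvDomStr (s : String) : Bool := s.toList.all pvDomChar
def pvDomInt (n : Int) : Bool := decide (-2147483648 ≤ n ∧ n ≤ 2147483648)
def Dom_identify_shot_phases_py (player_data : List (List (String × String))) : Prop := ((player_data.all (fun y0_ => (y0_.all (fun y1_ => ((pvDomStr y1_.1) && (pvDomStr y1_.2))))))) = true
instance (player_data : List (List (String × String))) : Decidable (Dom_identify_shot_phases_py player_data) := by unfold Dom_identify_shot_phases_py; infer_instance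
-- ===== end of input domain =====

-- B replaces A's prev-pointer per-frame loop by a run-length decomposition (group maximal runs of
-- equal arm-states, expand each run to head label + holds); same O(n) cost, objective: alternative.


-- ===== PORT A =====
-- one loop step of A: given (phases so far, prev_arm_state), consume one frame
def pvStepA (acc : List String × Option (String × String)) (frame_data : List (String × String)) :
    List String × Option (String × String) :=
  let current_arm_state :=
    (PySem.Dict.getD (PySem.Dict.mk frame_data) "left_arm" "", PySem.Dict.getD (PySem.Dict.mk frame_data) "right_arm" "")
  let phase :=
    match acc.2 with
    | none => "preparation"
    | some prev => if current_arm_state ≠ prev then "transition" else "hold"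
  (acc.1 ++ [phase], some current_arm_state)

def identify_shot_phases_py (player_data : List (List (String × String))) : List String :=
  if player_data.length < 3 then ["incomplete_shot"]
  else (player_data.foldl pvStepA ([], none)).1

-- ===== PORT B =====
-- B's take_run: length of the maximal prefix of `rest` equal to s, and the remainder
def pvTakeRun (s : String × String) : List (String × String) → Nat × List (String × String)
  | [] => (0, [])
  | x :: xs => if x = s then ((pvTakeRun s xs).1 + 1, (pvTakeRun s xs).2) else (0, x :: xs)

theorem pvTakeRun_len (s : String × String) :
    ∀ xs : List (String × String), (pvTakeRun s xs).2.length ≤ xs.length := by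
  intro xs
  induction xs with
  | nil => simp [pvTakeRun]
  | cons x xs ih =>
    simp only [pvTakeRun]
    split
    · exact Nat.le_succ_of_le ih
    · simp

-- B's outer while loop: consume one run at a time, emitting head label + holds
def pvRunPhases : Bool → List (String × String) → List String
  | _, [] => []
  | first, s :: rest =>
    (if first then "preparation" else "transition") ::
      (List.replicate (pvTakeRun s rest).1 "hold" ++ pvRunPhases false (pvTakeRun s rest).2)
termination_by _ xs => xs.length
decreasing_by
  exact Nat.lt_succ_of_le (pvTakeRun_len s rest)

def identify_shot_phases_py_alt (player_data : List (List (String × String))) : List String :=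
  if player_data.length < 3 then ["incomplete_shot"]
  else
    let states := player_data.map
      (fun f => (PySem.Dict.getD (PySem.Dict.mk f) "left_arm" "", PySem.Dict.getD (PySem.Dict.mk f) "right_arm" ""))
    pvRunPhases true states

-- ===== PRECONDITION & SPEC =====
def Spec_identify_shot_phases_py (player_data : List (List (String × String))) (out : List String) : Prop := out = identify_shot_phases_py_alt player_data
instance (player_data : List (List (String × String))) (out : List String) : Decidable (Spec_identify_shot_phases_py player_data out) := by unfold Spec_identify_shot_phases_py; infer_instance

-- ===== CLAIM (what is proved, stated in full; the proofs are below) =====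
def Claim_equal_identify_shot_phases_py : Prop := ∀ (player_data : List (List (String × String))), Dom_identify_shot_phases_py player_data → Spec_identify_shot_phases_py player_data (identify_shot_phases_py player_data)

-- ===== LEMMAS AND PROOFS =====

-- A's loop restated over precomputed states
def pvStepS (acc : List String × Option (String × String)) (s : String × String) :
    List String × Option (String × String) :=
  let phase :=
    match acc.2 with
    | none => "preparation"
    | some prev => if s ≠ prev then "transition" else "hold"
  (acc.1 ++ [phase], some s)

-- the pairwise labelling A performs after the first frame
def pvPair (p : String × String) : List (String × String) → List String
  | [] => []
  | s :: rest => (if s ≠ p then "transition" else "hold") :: pvPair s rest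

lemma pvFoldS_some (xs : List (String × String)) :
    ∀ (acc : List String) (p : String × String),
      (xs.foldl pvStepS (acc, some p)).1 = acc ++ pvPair p xs := by
  induction xs with
  | nil => intro acc p; simp [pvPair]
  | cons x xs ih =>
    intro acc p
    simp only [List.foldl_cons, pvStepS, pvPair]
    rw [ih]
    simp

-- expanding one run plus the remaining runs equals the pairwise labelling from prev = s
lemma pvRun_eq_pair : ∀ (xs : List (String × String)) (s : String × String),
    List.replicate (pvTakeRun s xs).1 "hold" ++ pvRunPhases false (pvTakeRun s xs).2 =
      pvPair s xs := by
  intro xs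
  induction xs with
  | nil => intro s; simp [pvTakeRun, pvRunPhases, pvPair]
  | cons x xs ih =>
    intro s
    by_cases h : x = s
    · subst h
      rw [show pvTakeRun x (x :: xs) = ((pvTakeRun x xs).1 + 1, (pvTakeRun x xs).2) from by
        simp [pvTakeRun]]
      simp only [pvPair, ne_eq, not_true_eq_false, if_false, List.replicate_succ,
        List.cons_append]
      rw [ih x]
    · simp only [pvTakeRun, if_neg h, pvPair, List.replicate_zero, List.nil_append]
      rw [pvRunPhases]
      simp only [ne_eq, h, not_false_eq_true, if_true]
      rw [ih x]
      rfl

theorem identify_shot_phases_py_spec : Claim_equal_identify_shot_phases_py := by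
  unfold Claim_equal_identify_shot_phases_py
  intro player_data _
  unfold Spec_identify_shot_phases_py identify_shot_phases_py identify_shot_phases_py_alt
  by_cases h : player_data.length < 3
  · simp [h]
  · simp only [h, if_false]
    match player_data, h with
    | f :: rest, _ =>
      rw [show ((f :: rest).foldl pvStepA ([], none)) = rest.foldl pvStepA (pvStepA ([], none) f) from rfl]
      have hmap : rest.foldl pvStepA (pvStepA ([], none) f) =
          (rest.map (fun g => (PySem.Dict.getD (PySem.Dict.mk g) "left_arm" "", PySem.Dict.getD (PySem.Dict.mk g) "right_arm" ""))).foldl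
            pvStepS (pvStepA ([], none) f) := by
        rw [List.foldl_map]; rfl
      rw [hmap]
      simp only [pvStepA]
      rw [pvFoldS_some]
      set s0 := (PySem.Dict.getD (PySem.Dict.mk f) "left_arm" "", PySem.Dict.getD (PySem.Dict.mk f) "right_arm" "")
      set sr := rest.map (fun g => (PySem.Dict.getD (PySem.Dict.mk g) "left_arm" "", PySem.Dict.getD (PySem.Dict.mk g) "right_arm" ""))
      simp only [List.map_cons]
      rw [pvRunPhases]
      simp only [if_true, List.nil_append]
      rw [pvRun_eq_pair]
      rfl

-- ===== VERDICT (by name: the statement is the Claim_ definition above) =====
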